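-- pv_equiv track=rewrite | github.com/jinglei88/YIMA | 易码编辑器.py | _count_indent_width
-- ===== SOURCE A (Python) =====
-- def _count_indent_width(line_text):
--     width = 0
--     for ch in line_text:
--         if ch == " ":
--             width += 1
--         elif ch == "\t":
--             width += 4
--         else:
--             break
--     return width
-- ===== SOURCE B (Python) =====
-- def _count_indent_width(line_text):
--     indent = len(line_text) - len(line_text.lstrip(" \t"))
--     return indent + 3 * line_text.count("\t", 0, indent)
-- ===== Notes on version B (the rewrite author's own statement) =====
-- stated objective: idiomatic
-- what changed: Replaces the accumulating break-loop with two library passes: lstrip(" \t") length difference finds the indent boundary, then the width is computed arithmetically as indent + 3 * (tab count in the prefix).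
import Mathlib
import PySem

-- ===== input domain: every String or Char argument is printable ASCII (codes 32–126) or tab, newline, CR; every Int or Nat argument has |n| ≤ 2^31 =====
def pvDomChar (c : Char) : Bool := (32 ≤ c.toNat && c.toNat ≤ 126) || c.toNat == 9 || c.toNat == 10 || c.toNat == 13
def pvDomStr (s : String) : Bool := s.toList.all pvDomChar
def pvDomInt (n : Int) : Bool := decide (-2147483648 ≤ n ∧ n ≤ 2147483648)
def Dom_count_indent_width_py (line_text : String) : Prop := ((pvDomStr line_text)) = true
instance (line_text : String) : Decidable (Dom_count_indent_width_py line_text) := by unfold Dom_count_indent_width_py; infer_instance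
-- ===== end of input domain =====

-- ===== PORT A =====
-- A: accumulate width over the chars, space adds 1, tab adds 4, break otherwise.
def countIndentLoopA : List Char → Int → Int
  | [], width => width
  | ch :: rest, width =>
    if ch = ' ' then countIndentLoopA rest (width + 1)
    else if ch = '\t' then countIndentLoopA rest (width + 4)
    else width

def count_indent_width_py (line_text : String) : Int :=
  countIndentLoopA line_text.toList 0

-- ===== PORT B =====
-- B: boundary via lstrip(" \t") length difference, then width = indent + 3 * tabs in prefix.
def count_indent_width_py_alt (line_text : String) : Int :=
  let cs := line_text.toList
  let stripped := cs.dropWhile (fun c => c == ' ' || c == '\t')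
  let indent := cs.length - stripped.length
  (indent : Int) + 3 * ((cs.take indent).count '\t' : Int)

-- ===== PRECONDITION & SPEC =====
def Spec_count_indent_width_py (line_text : String) (out : Int) : Prop := out = count_indent_width_py_alt line_text
instance (line_text : String) (out : Int) : Decidable (Spec_count_indent_width_py line_text out) := by unfold Spec_count_indent_width_py; infer_instance

-- ===== CLAIM (what is proved, stated in full; the proofs are below) =====
def Claim_equal_count_indent_width_py : Prop := ∀ (line_text : String), Dom_count_indent_width_py line_text → Spec_count_indent_width_py line_text (count_indent_width_py line_text)

-- ===== LEMMAS AND PROOFS =====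

-- ===== VERDICT (by name: the statement is the Claim_ definition above) =====
lemma lensub_eq_takeWhile_length (cs : List Char) :
    cs.length - (cs.dropWhile (fun c => c == ' ' || c == '\t')).length
      = (cs.takeWhile (fun c => c == ' ' || c == '\t')).length := by
  have h := congrArg List.length
    (List.takeWhile_append_dropWhile (p := fun c => c == ' ' || c == '\t') (l := cs))
  rw [List.length_append] at h
  omega

lemma take_indent_eq_takeWhile (cs : List Char) :
    cs.take (cs.length - (cs.dropWhile (fun c => c == ' ' || c == '\t')).length)
      = cs.takeWhile (fun c => c == ' ' || c == '\t') := by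
  rw [lensub_eq_takeWhile_length]
  obtain ⟨t, ht⟩ := List.takeWhile_prefix (p := fun c => c == ' ' || c == '\t') (l := cs)
  have h := List.take_left (l₁ := List.takeWhile (fun c => c == ' ' || c == '\t') cs) (l₂ := t)
  rw [ht] at h
  exact h

lemma loopA_eq (cs : List Char) (w : Int) :
    countIndentLoopA cs w
      = w + ((cs.takeWhile (fun c => c == ' ' || c == '\t')).length : Int)
          + 3 * (((cs.takeWhile (fun c => c == ' ' || c == '\t')).count '\t') : Int) := by
  induction cs generalizing w with
  | nil => simp [countIndentLoopA]
  | cons c rest ih =>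
    by_cases hs : c = ' '
    · subst hs
      simp [countIndentLoopA, List.takeWhile, ih]
      ring
    · by_cases ht : c = '\t'
      · subst ht
        simp [countIndentLoopA, List.takeWhile, ih]
        ring
      · have h1 : (c == ' ') = false := by simp [hs]
        have h2 : (c == '\t') = false := by simp [ht]
        simp [countIndentLoopA, List.takeWhile, h1, h2, hs, ht]

theorem count_indent_width_py_spec : Claim_equal_count_indent_width_py := by
  intro line_text _
  unfold Spec_count_indent_width_py count_indent_width_py count_indent_width_py_alt
  dsimp only
  rw [take_indent_eq_takeWhile, lensub_eq_takeWhile_length, loopA_eq]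
  ring
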